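-- pv_equiv track=rewrite | github.com/GhostOfMadness/leetcode | medium/1800-1900/1895.py | getPrefixSums
-- ===== SOURCE A (Python) =====
-- def getPrefixSums(grid: list[list[int]], m: int, n: int):
--     rows = [[0] * (n + 1) for _ in range(m + 2)]
--     cols = [[0] * (n + 1) for _ in range(m + 2)]
--     diag1 = [[0] * (n + 1) for _ in range(m + 2)]
--     diag2 = [[0] * (n + 1) for _ in range(m + 2)]
--     for j in range(n):
--         for i in range(m):
--             rows[i + 1][j + 1] = grid[i][j] + rows[i + 1][j]
--             cols[i + 1][j + 1] = grid[i][j] + cols[i][j + 1]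
--             diag1[i + 1][j + 1] = grid[i][j] + diag1[i + 2][j]
--             diag2[i + 1][j + 1] = grid[i][j] + diag2[i][j]
--     return rows, cols, diag1, diag2
-- ===== SOURCE B (Python) =====
-- def getPrefixSums(grid: list[list[int]], m: int, n: int):
--     def rect(i, j):
--         return 1 <= i <= m and 1 <= j <= n
--     rows = [[sum(grid[i - 1][j - 1 - k] for k in range(j)) if 1 <= i <= m else 0
--              for j in range(n + 1)] for i in range(m + 2)]
--     cols = [[sum(grid[i - 1 - k][j - 1] for k in range(i)) if rect(i, j) else 0
--              for j in range(n + 1)] for i in range(m + 2)]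
--     diag1 = [[sum(grid[i - 1 + k][j - 1 - k] for k in range(min(m - i + 1, j))) if rect(i, j) else 0
--               for j in range(n + 1)] for i in range(m + 2)]
--     diag2 = [[sum(grid[i - 1 - k][j - 1 - k] for k in range(min(i, j))) if rect(i, j) else 0
--               for j in range(n + 1)] for i in range(m + 2)]
--     return rows, cols, diag1, diag2
-- ===== Notes on version B (the rewrite author's own statement) =====
-- stated objective: alternative
-- what changed: A fills all four padded tables in one fused column-major DP loop using previously written table entries; B builds each table independently as a closed-form comprehension, computing every cell directly as an explicit sum over its row prefix, column prefix, or down-left/down-right diagonal segment.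
import Mathlib
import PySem

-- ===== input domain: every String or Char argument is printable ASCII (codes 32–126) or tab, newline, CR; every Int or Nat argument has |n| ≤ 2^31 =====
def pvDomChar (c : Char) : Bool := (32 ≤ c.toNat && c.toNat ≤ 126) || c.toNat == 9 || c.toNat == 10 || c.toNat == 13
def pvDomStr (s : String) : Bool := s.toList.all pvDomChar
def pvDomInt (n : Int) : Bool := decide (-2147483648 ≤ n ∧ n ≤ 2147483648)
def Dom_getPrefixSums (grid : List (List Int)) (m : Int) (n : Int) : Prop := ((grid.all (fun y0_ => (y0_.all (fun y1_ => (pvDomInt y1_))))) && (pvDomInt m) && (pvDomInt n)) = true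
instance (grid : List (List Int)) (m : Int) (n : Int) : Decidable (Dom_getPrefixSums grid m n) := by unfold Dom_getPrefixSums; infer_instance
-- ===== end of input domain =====

-- B replaces A's fused DP loop by four independent closed-form tables (each padded cell is a
-- direct sum along its row / column / diagonal); objective: alternative decomposition, not speed.

-- ===== PORT A =====
-- xs[i][j] (both grid reads and table reads): pyGetD with default — exact under Pre_,
-- where every index A uses is in range
def pvG (grid : List (List Int)) (i j : Int) : Int :=
  PySem.List.pyGetD (PySem.List.pyGetD grid i []) j 0

-- `t[i][j] = v`; the write indices A uses are always ≥ 0 and in range, so toNat/set are exact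
def pvWrite (t : List (List Int)) (i j : Int) (v : Int) : List (List Int) :=
  t.modify i.toNat (fun r => r.set j.toNat v)

def getPrefixSums (grid : List (List Int)) (m : Int) (n : Int) :
    List (List Int) × List (List Int) × List (List Int) × List (List Int) :=
  (PySem.List.pyRange 0 n 1).foldl (fun st j =>
    (PySem.List.pyRange 0 m 1).foldl (fun st i =>
      ( pvWrite st.1 (i + 1) (j + 1) (pvG grid i j + pvG st.1 (i + 1) j),
        pvWrite st.2.1 (i + 1) (j + 1) (pvG grid i j + pvG st.2.1 i (j + 1)),
        pvWrite st.2.2.1 (i + 1) (j + 1) (pvG grid i j + pvG st.2.2.1 (i + 2) j),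
        pvWrite st.2.2.2 (i + 1) (j + 1) (pvG grid i j + pvG st.2.2.2 i j) )) st)
    ( List.replicate (m + 2).toNat (List.replicate (n + 1).toNat 0),
      List.replicate (m + 2).toNat (List.replicate (n + 1).toNat 0),
      List.replicate (m + 2).toNat (List.replicate (n + 1).toNat 0),
      List.replicate (m + 2).toNat (List.replicate (n + 1).toNat 0) )

-- ===== PORT B =====
-- sum(... for k in range(t))
def pvSum (t : Int) (F : Int → Int) : Int := ((PySem.List.pyRange 0 t 1).map F).sum

def cellRows (grid : List (List Int)) (m : Int) (i j : Int) : Int :=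
  if 1 ≤ i ∧ i ≤ m then pvSum j (fun k => pvG grid (i - 1) (j - 1 - k)) else 0

def cellCols (grid : List (List Int)) (m n : Int) (i j : Int) : Int :=
  if 1 ≤ i ∧ i ≤ m ∧ 1 ≤ j ∧ j ≤ n then pvSum i (fun k => pvG grid (i - 1 - k) (j - 1)) else 0

def cellD1 (grid : List (List Int)) (m n : Int) (i j : Int) : Int :=
  if 1 ≤ i ∧ i ≤ m ∧ 1 ≤ j ∧ j ≤ n then
    pvSum (min (m - i + 1) j) (fun k => pvG grid (i - 1 + k) (j - 1 - k)) else 0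

def cellD2 (grid : List (List Int)) (m n : Int) (i j : Int) : Int :=
  if 1 ≤ i ∧ i ≤ m ∧ 1 ≤ j ∧ j ≤ n then
    pvSum (min i j) (fun k => pvG grid (i - 1 - k) (j - 1 - k)) else 0

def pvTable (m n : Int) (f : Int → Int → Int) : List (List Int) :=
  (PySem.List.pyRange 0 (m + 2) 1).map (fun i =>
    (PySem.List.pyRange 0 (n + 1) 1).map (fun j => f i j))

def getPrefixSums_alt (grid : List (List Int)) (m : Int) (n : Int) :
    List (List Int) × List (List Int) × List (List Int) × List (List Int) :=
  ( pvTable m n (cellRows grid m), pvTable m n (cellCols grid m n),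
    pvTable m n (cellD1 grid m n), pvTable m n (cellD2 grid m n) )

-- ===== PRECONDITION & SPEC =====
-- Pre_ excludes exactly the inputs where A raises IndexError: 0 < m, 0 < n but the grid has
-- fewer than m rows or one of the first m rows has fewer than n entries.
def Pre_getPrefixSums (grid : List (List Int)) (m : Int) (n : Int) : Prop :=
  0 < m → 0 < n → (m ≤ (grid.length : Int) ∧ ∀ r ∈ grid.take m.toNat, n ≤ (r.length : Int))

instance (grid : List (List Int)) (m : Int) (n : Int) : Decidable (Pre_getPrefixSums grid m n) := by
  unfold Pre_getPrefixSums; infer_instance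

def pvWitness_getPrefixSums : List (List Int) × Int × Int := ([[1, 2], [3, 4]], 2, 2)

def Spec_getPrefixSums (grid : List (List Int)) (m : Int) (n : Int)
    (out : List (List Int) × List (List Int) × List (List Int) × List (List Int)) : Prop :=
  out = getPrefixSums_alt grid m n

instance (grid : List (List Int)) (m : Int) (n : Int)
    (out : List (List Int) × List (List Int) × List (List Int) × List (List Int)) :
    Decidable (Spec_getPrefixSums grid m n out) := by unfold Spec_getPrefixSums; infer_instance

-- ===== CLAIM (what is proved, stated in full; the proofs are below) =====
def Claim_equal_getPrefixSums : Prop := ∀ (grid : List (List Int)) (m : Int) (n : Int), Dom_getPrefixSums grid m n → Pre_getPrefixSums grid m n → Spec_getPrefixSums grid m n (getPrefixSums grid m n)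

-- ===== LEMMAS AND PROOFS =====

-- the intermediate state of A's fill: columns ≤ J final, column J+1 filled for rows ≤ I
def pvPT (m n : Int) (f : Int → Int → Int) (J I : Int) : List (List Int) :=
  (PySem.List.pyRange 0 (m + 2) 1).map (fun a =>
    (PySem.List.pyRange 0 (n + 1) 1).map (fun b =>
      if b ≤ J ∨ (b = J + 1 ∧ a ≤ I) then f a b else 0))

theorem pvSum_neg (t : Int) (F : Int → Int) (h : t ≤ 0) : pvSum t F = 0 := by
  simp [pvSum, PySem.List.pyRange_one_eq_nil h]

theorem pvSum_snoc (t : Int) (F : Int → Int) (h : 0 ≤ t) :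
    pvSum (t + 1) F = pvSum t F + F t := by
  simp [pvSum, PySem.List.pyRange_one_succ_right h]

theorem pvSum_cons (t : Int) (F : Int → Int) (h : 0 ≤ t) :
    pvSum (t + 1) F = F 0 + pvSum t (fun k => F (k + 1)) := by
  obtain ⟨s, rfl⟩ := Int.eq_ofNat_of_zero_le h
  induction s with
  | zero =>
      push_cast
      rw [show (1 : Int) = 0 + 1 by ring, pvSum_snoc 0 F le_rfl, pvSum_neg 0 F le_rfl,
        pvSum_neg 0 _ le_rfl]
      ring
  | succ s ih =>
      have hs : (0 : Int) ≤ (s : Int) := Int.natCast_nonneg s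
      push_cast
      rw [show ((s : Int) + 1 + 1) = ((s : Int) + 1) + 1 by ring,
        pvSum_snoc _ _ (by omega), ih hs, pvSum_snoc _ _ hs]
      ring_nf

theorem pvG_pvPT (m n : Int) (f : Int → Int → Int) (J I a b : Int)
    (ha : 0 ≤ a) (ha2 : a < m + 2) (hb : 0 ≤ b) (hb2 : b < n + 1) :
    pvG (pvPT m n f J I) a b =
      if b ≤ J ∨ (b = J + 1 ∧ a ≤ I) then f a b else 0 := by
  unfold pvG pvPT
  rw [PySem.List.pyGetD_map_pyRange_of_nonneg _ _ _ _ ha ha2,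
    PySem.List.pyGetD_map_pyRange_of_nonneg _ _ _ _ hb hb2]

theorem pvWrite_pvPT (m n : Int) (f : Int → Int → Int) (J I : Int)
    (hJ : 0 ≤ J) (_hJn : J < n) (hI : 0 ≤ I) (_hIm : I < m) :
    pvWrite (pvPT m n f J I) (I + 1) (J + 1) (f (I + 1) (J + 1)) = pvPT m n f J (I + 1) := by
  unfold pvWrite pvPT
  apply List.ext_getElem
  · simp
  intro r h1 h2
  simp only [List.length_modify, List.length_map, PySem.List.length_pyRange_one] at h1 h2
  rw [List.getElem_modify]
  by_cases hr : (I + 1).toNat = r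
  · rw [if_pos hr]
    have hrI : (r : Int) = I + 1 := by omega
    apply List.ext_getElem
    · simp
    intro c hc1 hc2
    simp only [List.length_set] at hc1 hc2
    rw [List.getElem_set]
    by_cases hcJ : (J + 1).toNat = c
    · have hcJ' : (c : Int) = J + 1 := by omega
      rw [if_pos hcJ]
      simp only [List.getElem_map, PySem.List.getElem_pyRange_one]
      rw [show (0 : Int) + (c : Int) = J + 1 by omega, show (0 : Int) + (r : Int) = I + 1 by omega,
        if_pos (Or.inr ⟨rfl, le_rfl⟩)]
    · rw [if_neg hcJ]
      simp only [List.getElem_map, PySem.List.getElem_pyRange_one]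
      have hiff : ((0 : Int) + (c : Int) ≤ J ∨ ((0 : Int) + (c : Int) = J + 1 ∧ (0 : Int) + (r : Int) ≤ I))
          ↔ ((0 : Int) + (c : Int) ≤ J ∨ ((0 : Int) + (c : Int) = J + 1 ∧ (0 : Int) + (r : Int) ≤ I + 1)) := by
        omega
      simp only [hiff]
  · rw [if_neg hr]
    have hrI : (r : Int) ≠ I + 1 := by omega
    simp only [List.getElem_map, PySem.List.getElem_pyRange_one]
    have hiff : ∀ b : Int, ((b ≤ J ∨ (b = J + 1 ∧ (0 : Int) + (r : Int) ≤ I))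
        ↔ (b ≤ J ∨ (b = J + 1 ∧ (0 : Int) + (r : Int) ≤ I + 1))) := by
      intro b; omega
    simp only [hiff]

theorem pvPT_congr (m n : Int) (f : Int → Int → Int) (J I J' I' : Int)
    (h : ∀ a b, 0 ≤ a → a < m + 2 → 0 ≤ b → b < n + 1 →
      (if b ≤ J ∨ (b = J + 1 ∧ a ≤ I) then f a b else 0) =
      (if b ≤ J' ∨ (b = J' + 1 ∧ a ≤ I') then f a b else 0)) :
    pvPT m n f J I = pvPT m n f J' I' := by
  unfold pvPT
  refine List.map_congr_left (fun a hamem => ?_)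
  rw [PySem.List.mem_pyRange_one] at hamem
  refine List.map_congr_left (fun b hbmem => ?_)
  rw [PySem.List.mem_pyRange_one] at hbmem
  exact h a b hamem.1 hamem.2 hbmem.1 hbmem.2

theorem replicate_eq_pvPT (m n : Int) (f : Int → Int → Int)
    (hcol0 : ∀ a, f a 0 = 0) (hrow0 : ∀ b, f 0 b = 0) :
    List.replicate (m + 2).toNat (List.replicate (n + 1).toNat 0) = pvPT m n f 0 0 := by
  symm
  rw [List.eq_replicate_iff]
  constructor
  · simp [pvPT, PySem.List.length_pyRange_one]
  · intro r hr
    unfold pvPT at hr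
    obtain ⟨a, hamem, rfl⟩ := List.mem_map.mp hr
    rw [PySem.List.mem_pyRange_one] at hamem
    rw [List.eq_replicate_iff]
    constructor
    · simp [PySem.List.length_pyRange_one]
    · intro v hv
      obtain ⟨b, hbmem, rfl⟩ := List.mem_map.mp hv
      rw [PySem.List.mem_pyRange_one] at hbmem
      split_ifs with hc
      · rcases hc with hb0 | ⟨rfl, ha0⟩
        · have : b = 0 := le_antisymm hb0 hbmem.1
          subst this; exact hcol0 a
        · have : a = 0 := le_antisymm ha0 hamem.1
          subst this; exact hrow0 1
      · rfl

-- recurrences of the four cell functions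
theorem recR (grid : List (List Int)) (m n i j : Int) (hi : 0 ≤ i) (him : i < m)
    (hj : 0 ≤ j) (_hjn : j < n) :
    cellRows grid m (i + 1) (j + 1) = pvG grid i j + cellRows grid m (i + 1) j := by
  unfold cellRows
  rw [if_pos (show 1 ≤ i + 1 ∧ i + 1 ≤ m by omega), if_pos (show 1 ≤ i + 1 ∧ i + 1 ≤ m by omega)]
  have e1 : (fun k => pvG grid (i + 1 - 1) (j + 1 - 1 - k)) = fun k => pvG grid i (j - k) := by
    funext k; rw [show i + 1 - 1 = i by ring, show j + 1 - 1 - k = j - k by ring]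
  rw [e1, pvSum_cons j _ hj]
  have e2 : (fun k => pvG grid i (j - (k + 1))) = fun k => pvG grid (i + 1 - 1) (j - 1 - k) := by
    funext k; rw [show i + 1 - 1 = i by ring, show j - (k + 1) = j - 1 - k by ring]
  rw [show j - 0 = j by ring, e2]

theorem recC (grid : List (List Int)) (m n i j : Int) (hi : 0 ≤ i) (him : i < m)
    (hj : 0 ≤ j) (_hjn : j < n) :
    cellCols grid m n (i + 1) (j + 1) = pvG grid i j + cellCols grid m n i (j + 1) := by
  unfold cellCols
  rw [if_pos (show 1 ≤ i + 1 ∧ i + 1 ≤ m ∧ 1 ≤ j + 1 ∧ j + 1 ≤ n by omega)]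
  have e1 : (fun k => pvG grid (i + 1 - 1 - k) (j + 1 - 1)) = fun k => pvG grid (i - k) j := by
    funext k; rw [show i + 1 - 1 - k = i - k by ring, show j + 1 - 1 = j by ring]
  rw [e1, pvSum_cons i _ hi, show i - 0 = i by ring]
  by_cases hi1 : 1 ≤ i
  · rw [if_pos (show 1 ≤ i ∧ i ≤ m ∧ 1 ≤ j + 1 ∧ j + 1 ≤ n by omega)]
    have e2 : (fun k => pvG grid (i - (k + 1)) j) = fun k => pvG grid (i - 1 - k) (j + 1 - 1) := by
      funext k; rw [show i - (k + 1) = i - 1 - k by ring, show j + 1 - 1 = j by ring]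
    rw [e2]
  · rw [if_neg (by omega), pvSum_neg i _ (by omega)]

theorem rec1 (grid : List (List Int)) (m n i j : Int) (hi : 0 ≤ i) (him : i < m)
    (hj : 0 ≤ j) (hjn : j < n) :
    cellD1 grid m n (i + 1) (j + 1) = pvG grid i j + cellD1 grid m n (i + 2) j := by
  unfold cellD1
  rw [if_pos (show 1 ≤ i + 1 ∧ i + 1 ≤ m ∧ 1 ≤ j + 1 ∧ j + 1 ≤ n by omega)]
  have e1 : (fun k => pvG grid (i + 1 - 1 + k) (j + 1 - 1 - k)) = fun k => pvG grid (i + k) (j - k) := by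
    funext k; rw [show i + 1 - 1 + k = i + k by ring, show j + 1 - 1 - k = j - k by ring]
  rw [e1, show min (m - (i + 1) + 1) (j + 1) = min (m - i - 1) j + 1 by omega,
    pvSum_cons _ _ (by omega), show i + (0 : Int) = i by ring, show j - (0 : Int) = j by ring]
  by_cases hc : i + 2 ≤ m ∧ 1 ≤ j
  · rw [if_pos (show 1 ≤ i + 2 ∧ i + 2 ≤ m ∧ 1 ≤ j ∧ j ≤ n by omega)]
    have e2 : (fun k => pvG grid (i + (k + 1)) (j - (k + 1)))
        = fun k => pvG grid (i + 2 - 1 + k) (j - 1 - k) := by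
      funext k; rw [show i + (k + 1) = i + 2 - 1 + k by ring, show j - (k + 1) = j - 1 - k by ring]
    rw [e2, show m - (i + 2) + 1 = m - i - 1 by ring]
  · rw [if_neg (by omega), show min (m - i - 1) j = 0 by omega, pvSum_neg 0 _ le_rfl]

theorem rec2 (grid : List (List Int)) (m n i j : Int) (hi : 0 ≤ i) (him : i < m)
    (hj : 0 ≤ j) (hjn : j < n) :
    cellD2 grid m n (i + 1) (j + 1) = pvG grid i j + cellD2 grid m n i j := by
  unfold cellD2
  rw [if_pos (show 1 ≤ i + 1 ∧ i + 1 ≤ m ∧ 1 ≤ j + 1 ∧ j + 1 ≤ n by omega)]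
  have e1 : (fun k => pvG grid (i + 1 - 1 - k) (j + 1 - 1 - k)) = fun k => pvG grid (i - k) (j - k) := by
    funext k; rw [show i + 1 - 1 - k = i - k by ring, show j + 1 - 1 - k = j - k by ring]
  rw [e1, show min (i + 1) (j + 1) = min i j + 1 by omega, pvSum_cons _ _ (by omega),
    show i - (0 : Int) = i by ring, show j - (0 : Int) = j by ring]
  by_cases hc : 1 ≤ i ∧ 1 ≤ j
  · rw [if_pos (show 1 ≤ i ∧ i ≤ m ∧ 1 ≤ j ∧ j ≤ n by omega)]
    have e2 : (fun k => pvG grid (i - (k + 1)) (j - (k + 1)))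
        = fun k => pvG grid (i - 1 - k) (j - 1 - k) := by
      funext k; rw [show i - (k + 1) = i - 1 - k by ring, show j - (k + 1) = j - 1 - k by ring]
    rw [e2]
  · rw [if_neg (by omega), show min i j = 0 by omega, pvSum_neg 0 _ le_rfl]

-- trivial zero facts about the four cell functions
theorem cellRows_col0 (grid : List (List Int)) (m a : Int) : cellRows grid m a 0 = 0 := by
  unfold cellRows; split_ifs
  · exact pvSum_neg 0 _ le_rfl
  · rfl

theorem cellRows_row0 (grid : List (List Int)) (m b : Int) : cellRows grid m 0 b = 0 := by
  unfold cellRows; rw [if_neg (by omega)]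

theorem cellRows_top (grid : List (List Int)) (m a b : Int) (h : m < a) : cellRows grid m a b = 0 := by
  unfold cellRows; rw [if_neg (by omega)]

theorem cellCols_col0 (grid : List (List Int)) (m n a : Int) : cellCols grid m n a 0 = 0 := by
  unfold cellCols; rw [if_neg (by omega)]

theorem cellCols_row0 (grid : List (List Int)) (m n b : Int) : cellCols grid m n 0 b = 0 := by
  unfold cellCols; rw [if_neg (by omega)]

theorem cellCols_top (grid : List (List Int)) (m n a b : Int) (h : m < a) : cellCols grid m n a b = 0 := by
  unfold cellCols; rw [if_neg (by omega)]

theorem cellD1_col0 (grid : List (List Int)) (m n a : Int) : cellD1 grid m n a 0 = 0 := by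
  unfold cellD1; rw [if_neg (by omega)]

theorem cellD1_row0 (grid : List (List Int)) (m n b : Int) : cellD1 grid m n 0 b = 0 := by
  unfold cellD1; rw [if_neg (by omega)]

theorem cellD1_top (grid : List (List Int)) (m n a b : Int) (h : m < a) : cellD1 grid m n a b = 0 := by
  unfold cellD1; rw [if_neg (by omega)]

theorem cellD2_col0 (grid : List (List Int)) (m n a : Int) : cellD2 grid m n a 0 = 0 := by
  unfold cellD2; rw [if_neg (by omega)]

theorem cellD2_row0 (grid : List (List Int)) (m n b : Int) : cellD2 grid m n 0 b = 0 := by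
  unfold cellD2; rw [if_neg (by omega)]

theorem cellD2_top (grid : List (List Int)) (m n a b : Int) (h : m < a) : cellD2 grid m n a b = 0 := by
  unfold cellD2; rw [if_neg (by omega)]

-- column t+1 of A's fill becomes final once every row above I is zero there
theorem pvPT_advance (m n : Int) (f : Int → Int → Int) (t I : Int)
    (hfill : ∀ a, I < a → f a (t + 1) = 0) (hrow0 : ∀ b, f 0 b = 0) :
    pvPT m n f t I = pvPT m n f (t + 1) 0 := by
  apply pvPT_congr
  intro a b ha ha2 hb hb2
  split_ifs with h1 h2 h2
  · rfl
  · exact absurd (by omega) h2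
  · by_cases hbt : b = t + 2
    · have ha0 : a = 0 := by omega
      subst ha0; exact (hrow0 b).symm
    · have hb1 : b = t + 1 := by omega
      have : I < a := by omega
      subst hb1; exact (hfill a this).symm
  · rfl

theorem pvPT_full (m n : Int) (f : Int → Int → Int) (I : Int) :
    pvPT m n f n I = pvTable m n f := by
  unfold pvPT pvTable
  refine List.map_congr_left (fun a hamem => ?_)
  refine List.map_congr_left (fun b hbmem => ?_)
  rw [PySem.List.mem_pyRange_one] at hbmem
  rw [if_pos (Or.inl (by omega))]

theorem replicate_eq_pvTable (m n : Int) (f : Int → Int → Int) (hn : n ≤ 0)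
    (hcol0 : ∀ a, f a 0 = 0) :
    List.replicate (m + 2).toNat (List.replicate (n + 1).toNat 0) = pvTable m n f := by
  symm
  rw [List.eq_replicate_iff]
  refine ⟨by simp [pvTable, PySem.List.length_pyRange_one], fun r hr => ?_⟩
  obtain ⟨a, hamem, rfl⟩ := List.mem_map.mp hr
  rw [List.eq_replicate_iff]
  refine ⟨by simp [PySem.List.length_pyRange_one], fun v hv => ?_⟩
  obtain ⟨b, hbmem, rfl⟩ := List.mem_map.mp hv
  rw [PySem.List.mem_pyRange_one] at hbmem
  have hb0 : b = 0 := by omega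
  subst hb0; exact hcol0 a

-- the inner loop of A (column J+1, rows 1..s) seen on pvPT states
theorem innerLoop (grid : List (List Int)) (m n J : Int) (hJ : 0 ≤ J) (hJn : J < n)
    (s : Int) (hs0 : 0 ≤ s) (hsm : s ≤ m) :
    (PySem.List.pyRange 0 s 1).foldl (fun st i =>
      ( pvWrite st.1 (i + 1) (J + 1) (pvG grid i J + pvG st.1 (i + 1) J),
        pvWrite st.2.1 (i + 1) (J + 1) (pvG grid i J + pvG st.2.1 i (J + 1)),
        pvWrite st.2.2.1 (i + 1) (J + 1) (pvG grid i J + pvG st.2.2.1 (i + 2) J),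
        pvWrite st.2.2.2 (i + 1) (J + 1) (pvG grid i J + pvG st.2.2.2 i J) ))
      ( pvPT m n (cellRows grid m) J 0, pvPT m n (cellCols grid m n) J 0,
        pvPT m n (cellD1 grid m n) J 0, pvPT m n (cellD2 grid m n) J 0 )
    = ( pvPT m n (cellRows grid m) J s, pvPT m n (cellCols grid m n) J s,
        pvPT m n (cellD1 grid m n) J s, pvPT m n (cellD2 grid m n) J s ) := by
  obtain ⟨s, rfl⟩ := Int.eq_ofNat_of_zero_le hs0
  induction s with
  | zero => simp [PySem.List.pyRange_one_eq_nil]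
  | succ s ih =>
      have hs : (0 : Int) ≤ (s : Int) := Int.natCast_nonneg s
      have hsm' : (s : Int) < m := by push_cast at hsm; omega
      push_cast
      rw [PySem.List.pyRange_one_succ_right hs, List.foldl_append, ih hs (by omega),
        List.foldl_cons, List.foldl_nil]
      simp only [Prod.mk.injEq]
      refine ⟨?_, ?_, ?_, ?_⟩
      · rw [pvG_pvPT m n _ J (s : Int) ((s : Int) + 1) J (by omega) (by omega) hJ (by omega),
          if_pos (Or.inl le_rfl), ← recR grid m n s J hs hsm' hJ hJn]
        exact pvWrite_pvPT m n _ J s hJ hJn hs hsm'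
      · rw [pvG_pvPT m n _ J (s : Int) (s : Int) (J + 1) hs (by omega) (by omega) (by omega),
          if_pos (Or.inr ⟨rfl, le_rfl⟩), ← recC grid m n s J hs hsm' hJ hJn]
        exact pvWrite_pvPT m n _ J s hJ hJn hs hsm'
      · rw [pvG_pvPT m n _ J (s : Int) ((s : Int) + 2) J (by omega) (by omega) hJ (by omega),
          if_pos (Or.inl le_rfl), ← rec1 grid m n s J hs hsm' hJ hJn]
        exact pvWrite_pvPT m n _ J s hJ hJn hs hsm'
      · rw [pvG_pvPT m n _ J (s : Int) (s : Int) J hs (by omega) hJ (by omega),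
          if_pos (Or.inl le_rfl), ← rec2 grid m n s J hs hsm' hJ hJn]
        exact pvWrite_pvPT m n _ J s hJ hJn hs hsm'

-- the outer loop of A after processing columns 1..t
theorem outerLoop (grid : List (List Int)) (m n : Int) (t : Int) (ht0 : 0 ≤ t) (htn : t ≤ n) :
    (PySem.List.pyRange 0 t 1).foldl (fun st j =>
      (PySem.List.pyRange 0 m 1).foldl (fun st i =>
        ( pvWrite st.1 (i + 1) (j + 1) (pvG grid i j + pvG st.1 (i + 1) j),
          pvWrite st.2.1 (i + 1) (j + 1) (pvG grid i j + pvG st.2.1 i (j + 1)),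
          pvWrite st.2.2.1 (i + 1) (j + 1) (pvG grid i j + pvG st.2.2.1 (i + 2) j),
          pvWrite st.2.2.2 (i + 1) (j + 1) (pvG grid i j + pvG st.2.2.2 i j) )) st)
      ( List.replicate (m + 2).toNat (List.replicate (n + 1).toNat 0),
        List.replicate (m + 2).toNat (List.replicate (n + 1).toNat 0),
        List.replicate (m + 2).toNat (List.replicate (n + 1).toNat 0),
        List.replicate (m + 2).toNat (List.replicate (n + 1).toNat 0) )
    = ( pvPT m n (cellRows grid m) t 0, pvPT m n (cellCols grid m n) t 0,
        pvPT m n (cellD1 grid m n) t 0, pvPT m n (cellD2 grid m n) t 0 ) := by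
  obtain ⟨t, rfl⟩ := Int.eq_ofNat_of_zero_le ht0
  induction t with
  | zero =>
      simp only [Int.natCast_zero, PySem.List.pyRange_one_eq_nil le_rfl, List.foldl_nil,
        Prod.mk.injEq]
      exact ⟨replicate_eq_pvPT m n _ (cellRows_col0 grid m) (cellRows_row0 grid m),
        replicate_eq_pvPT m n _ (cellCols_col0 grid m n) (cellCols_row0 grid m n),
        replicate_eq_pvPT m n _ (cellD1_col0 grid m n) (cellD1_row0 grid m n),
        replicate_eq_pvPT m n _ (cellD2_col0 grid m n) (cellD2_row0 grid m n)⟩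
  | succ t ih =>
      have ht : (0 : Int) ≤ (t : Int) := Int.natCast_nonneg t
      have htn' : (t : Int) < n := by push_cast at htn; omega
      push_cast
      rw [PySem.List.pyRange_one_succ_right ht, List.foldl_append, ih ht (le_of_lt htn'),
        List.foldl_cons, List.foldl_nil]
      by_cases hm : 0 < m
      · rw [innerLoop grid m n (t : Int) ht htn' m (le_of_lt hm) le_rfl]
        simp only [Prod.mk.injEq]
        exact ⟨pvPT_advance m n _ _ m (fun a ha => cellRows_top grid m a _ ha) (cellRows_row0 grid m),
          pvPT_advance m n _ _ m (fun a ha => cellCols_top grid m n a _ ha) (cellCols_row0 grid m n),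
          pvPT_advance m n _ _ m (fun a ha => cellD1_top grid m n a _ ha) (cellD1_row0 grid m n),
          pvPT_advance m n _ _ m (fun a ha => cellD2_top grid m n a _ ha) (cellD2_row0 grid m n)⟩
      · rw [PySem.List.pyRange_one_eq_nil (by omega), List.foldl_nil]
        simp only [Prod.mk.injEq]
        exact ⟨pvPT_advance m n _ _ 0 (fun a ha => cellRows_top grid m a _ (by omega)) (cellRows_row0 grid m),
          pvPT_advance m n _ _ 0 (fun a ha => cellCols_top grid m n a _ (by omega)) (cellCols_row0 grid m n),
          pvPT_advance m n _ _ 0 (fun a ha => cellD1_top grid m n a _ (by omega)) (cellD1_row0 grid m n),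
          pvPT_advance m n _ _ 0 (fun a ha => cellD2_top grid m n a _ (by omega)) (cellD2_row0 grid m n)⟩

-- ===== VERDICT (by name: the statement is the Claim_ definition above) =====
theorem getPrefixSums_spec : Claim_equal_getPrefixSums := by
  intro grid m n _hdom _hpre
  unfold Spec_getPrefixSums getPrefixSums getPrefixSums_alt
  by_cases hn : 0 < n
  · rw [outerLoop grid m n n (le_of_lt hn) le_rfl]
    simp only [Prod.mk.injEq]
    exact ⟨pvPT_full m n _ 0, pvPT_full m n _ 0, pvPT_full m n _ 0, pvPT_full m n _ 0⟩
  · rw [show PySem.List.pyRange 0 n 1 = [] from PySem.List.pyRange_one_eq_nil (by omega),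
      List.foldl_nil]
    simp only [Prod.mk.injEq]
    exact ⟨replicate_eq_pvTable m n _ (by omega) (cellRows_col0 grid m),
      replicate_eq_pvTable m n _ (by omega) (cellCols_col0 grid m n),
      replicate_eq_pvTable m n _ (by omega) (cellD1_col0 grid m n),
      replicate_eq_pvTable m n _ (by omega) (cellD2_col0 grid m n)⟩
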